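-- pv_equiv track=rewrite | github.com/Rajashekarreddy111/Time_Table_ | backend/services/timetable_generator.py | _faculty_has_consecutive_different_section_conflict
-- ===== SOURCE A (Python) =====
-- def _faculty_has_consecutive_different_section_conflict(
--     faculty_id: str,
--     day: str,
--     periods: range | list[int] | tuple[int, ...],
--     section_signature: tuple[str, ...],
--     faculty_section_slots: dict[str, dict[tuple[str, int], tuple[str, ...]]],
--     session_adjacency: dict[int, set[int]],
-- ) -> bool:
--     assigned_slots = faculty_section_slots.get(faculty_id, {})
--     period_set = {int(period) for period in periods}
--     for period in period_set:
--         for adjacent_period in session_adjacency.get(period, set()):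
--             if adjacent_period in period_set:
--                 continue
--             adjacent_sections = assigned_slots.get((day, adjacent_period))
--             if adjacent_sections and adjacent_sections != section_signature:
--                 return True
--     return False
-- ===== SOURCE B (Python) =====
-- def _faculty_has_consecutive_different_section_conflict(
--     faculty_id,
--     day,
--     periods,
--     section_signature,
--     faculty_section_slots,
--     session_adjacency,
-- ):
--     # Staged set computation: first build the set of candidate adjacent
--     # periods (union of adjacency over the block, minus the block itself),
--     # then the set of this faculty's conflicting assigned periods on `day`,
--     # and answer with a single set-intersection test.
--     period_set = {int(p) for p in periods}
--     neighbours = set()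
--     for p in periods:
--         neighbours |= set(session_adjacency.get(int(p), set()))
--     neighbours -= period_set
--     assigned = faculty_section_slots.get(faculty_id, {})
--     conflicting = {q for (d, q), secs in assigned.items()
--                    if d == day and secs and secs != section_signature}
--     return not neighbours.isdisjoint(conflicting)
-- ===== Notes on version B (the rewrite author's own statement) =====
-- stated objective: alternative
-- what changed: B replaces A's nested loop with early return (periods -> adjacency -> per-slot dict lookup) by three staged set computations: the union of adjacency sets of the block minus the block, the set of the faculty's conflicting assigned periods on the day, and a single set-intersection (isdisjoint) test.
import Mathlib
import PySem

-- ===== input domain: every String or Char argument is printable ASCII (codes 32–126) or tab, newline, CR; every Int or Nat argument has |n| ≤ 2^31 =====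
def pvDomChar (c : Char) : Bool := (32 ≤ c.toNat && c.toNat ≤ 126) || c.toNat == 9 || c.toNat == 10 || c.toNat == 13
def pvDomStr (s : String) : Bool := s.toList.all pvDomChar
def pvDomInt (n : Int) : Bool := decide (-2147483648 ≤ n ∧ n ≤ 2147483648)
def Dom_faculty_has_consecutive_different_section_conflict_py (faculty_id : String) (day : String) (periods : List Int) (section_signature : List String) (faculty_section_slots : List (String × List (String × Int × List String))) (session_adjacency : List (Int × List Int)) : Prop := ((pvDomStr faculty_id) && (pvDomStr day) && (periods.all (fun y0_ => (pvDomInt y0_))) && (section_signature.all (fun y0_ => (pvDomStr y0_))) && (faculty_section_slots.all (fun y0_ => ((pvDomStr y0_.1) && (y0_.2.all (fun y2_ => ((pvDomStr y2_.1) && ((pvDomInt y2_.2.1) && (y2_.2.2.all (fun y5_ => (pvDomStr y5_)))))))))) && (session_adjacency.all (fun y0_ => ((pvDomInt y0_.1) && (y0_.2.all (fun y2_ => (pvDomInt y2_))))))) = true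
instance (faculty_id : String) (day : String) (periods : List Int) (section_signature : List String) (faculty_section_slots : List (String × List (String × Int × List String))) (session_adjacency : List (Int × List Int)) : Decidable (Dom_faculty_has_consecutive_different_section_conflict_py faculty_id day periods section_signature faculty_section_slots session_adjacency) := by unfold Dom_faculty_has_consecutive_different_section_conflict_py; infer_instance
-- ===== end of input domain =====

-- B restructures A's nested loop into three staged set computations (adjacency union minus the block, the faculty's conflicting periods on the day, one set-intersection test); objective: alternative decomposition, same cost.


-- ===== PORT A =====
def faculty_has_consecutive_different_section_conflict_py (faculty_id : String) (day : String) (periods : List Int) (section_signature : List String) (faculty_section_slots : List (String × List (String × Int × List String))) (session_adjacency : List (Int × List Int)) : Bool :=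
  let assigned_slots : PySem.Dict (String × Int) (List String) :=
    PySem.Dict.ofList (((PySem.Dict.ofList faculty_section_slots).getD faculty_id []).map (fun e => ((e.1, e.2.1), e.2.2)))
  let period_set : PySem.Set Int := PySem.Set.ofList periods
  period_set.any (fun period =>
    ((PySem.Dict.ofList session_adjacency).getD period []).any (fun adjacent_period =>
      if period_set.contains adjacent_period then false
      else
        match assigned_slots.get? (day, adjacent_period) with
        | none => false
        | some adjacent_sections => !adjacent_sections.isEmpty && !(adjacent_sections == section_signature)))

-- ===== PORT B =====
def faculty_has_consecutive_different_section_conflict_py_alt (faculty_id : String) (day : String) (periods : List Int) (section_signature : List String) (faculty_section_slots : List (String × List (String × Int × List String))) (session_adjacency : List (Int × List Int)) : Bool :=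
  let period_set : PySem.Set Int := PySem.Set.ofList periods
  let adjD : PySem.Dict Int (List Int) := PySem.Dict.ofList session_adjacency
  let neighbours0 : PySem.Set Int :=
    periods.foldl (fun acc p => PySem.Set.union acc (adjD.getD p [])) PySem.Set.empty
  let neighbours : PySem.Set Int := PySem.Set.diff neighbours0 period_set
  let assigned : PySem.Dict (String × Int) (List String) :=
    PySem.Dict.ofList (((PySem.Dict.ofList faculty_section_slots).getD faculty_id []).map (fun e => ((e.1, e.2.1), e.2.2)))
  let conflicting : PySem.Set Int :=
    assigned.items.foldl
      (fun acc it =>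
        if it.1.1 == day && !it.2.isEmpty && !(it.2 == section_signature)
        then PySem.Set.add acc it.1.2 else acc)
      PySem.Set.empty
  !(PySem.Set.isdisjoint neighbours conflicting)

-- ===== PRECONDITION & SPEC =====
def Spec_faculty_has_consecutive_different_section_conflict_py (faculty_id : String) (day : String) (periods : List Int) (section_signature : List String) (faculty_section_slots : List (String × List (String × Int × List String))) (session_adjacency : List (Int × List Int)) (out : Bool) : Prop := out = faculty_has_consecutive_different_section_conflict_py_alt faculty_id day periods section_signature faculty_section_slots session_adjacency
instance (faculty_id : String) (day : String) (periods : List Int) (section_signature : List String) (faculty_section_slots : List (String × List (String × Int × List String))) (session_adjacency : List (Int × List Int)) (out : Bool) : Decidable (Spec_faculty_has_consecutive_different_section_conflict_py faculty_id day periods section_signature faculty_section_slots session_adjacency out) := by unfold Spec_faculty_has_consecutive_different_section_conflict_py; infer_instance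

-- ===== CLAIM (what is proved, stated in full; the proofs are below) =====
def Claim_equal_faculty_has_consecutive_different_section_conflict_py : Prop := ∀ (faculty_id : String) (day : String) (periods : List Int) (section_signature : List String) (faculty_section_slots : List (String × List (String × Int × List String))) (session_adjacency : List (Int × List Int)), Dom_faculty_has_consecutive_different_section_conflict_py faculty_id day periods section_signature faculty_section_slots session_adjacency → Spec_faculty_has_consecutive_different_section_conflict_py faculty_id day periods section_signature faculty_section_slots session_adjacency (faculty_has_consecutive_different_section_conflict_py faculty_id day periods section_signature faculty_section_slots session_adjacency)

-- ===== LEMMAS AND PROOFS =====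

-- membership in B's adjacency-union loop
theorem pv_mem_union_fold (l : List Int) (adjD : PySem.Dict Int (List Int)) (acc : PySem.Set Int) (y : Int) :
    y ∈ l.foldl (fun acc p => PySem.Set.union acc (adjD.getD p [])) acc ↔
      y ∈ acc ∨ ∃ p ∈ l, y ∈ adjD.getD p [] := by
  induction l generalizing acc with
  | nil => simp
  | cons h t ih =>
    simp only [List.foldl_cons, ih, PySem.Set.mem_union, List.mem_cons]
    constructor
    · rintro (⟨hy | hy⟩ | ⟨p, hp, hy⟩)
      · exact Or.inl hy
      · exact Or.inr ⟨h, Or.inl rfl, hy⟩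
      · exact Or.inr ⟨p, Or.inr hp, hy⟩
    · rintro (hy | ⟨p, (rfl | hp), hy⟩)
      · exact Or.inl (Or.inl hy)
      · exact Or.inl (Or.inr hy)
      · exact Or.inr ⟨p, hp, hy⟩

-- membership in B's conflicting-set comprehension loop
theorem pv_mem_filter_add_fold (items : List ((String × Int) × List String)) (c : (String × Int) × List String → Bool) (acc : PySem.Set Int) (y : Int) :
    y ∈ items.foldl (fun acc it => if c it then PySem.Set.add acc it.1.2 else acc) acc ↔
      y ∈ acc ∨ ∃ it ∈ items, c it ∧ y = it.1.2 := by
  induction items generalizing acc with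
  | nil => simp
  | cons h t ih =>
    simp only [List.foldl_cons, List.mem_cons]
    by_cases hc : c h
    · rw [if_pos hc]
      simp only [ih, PySem.Set.mem_add]
      constructor
      · rintro (⟨hy | rfl⟩ | ⟨it, hit, hcit, hy⟩)
        · exact Or.inl hy
        · exact Or.inr ⟨h, Or.inl rfl, hc, rfl⟩
        · exact Or.inr ⟨it, Or.inr hit, hcit, hy⟩
      · rintro (hy | ⟨it, (rfl | hit), hcit, hy⟩)
        · exact Or.inl (Or.inl hy)
        · exact Or.inl (Or.inr hy)
        · exact Or.inr ⟨it, hit, hcit, hy⟩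
    · rw [if_neg hc]
      simp only [ih]
      constructor
      · rintro (hy | ⟨it, hit, hcit, hy⟩)
        · exact Or.inl hy
        · exact Or.inr ⟨it, Or.inr hit, hcit, hy⟩
      · rintro (hy | ⟨it, (rfl | hit), hcit, hy⟩)
        · exact Or.inl hy
        · exact absurd hcit (by simp [hc])
        · exact Or.inr ⟨it, hit, hcit, hy⟩

-- core bridge: A's nested scan decides the same existential as B's intersection test
theorem pv_conflict_eq (day : String) (sig : List String) (periods : List Int)
    (asn : PySem.Dict (String × Int) (List String)) (adjD : PySem.Dict Int (List Int))
    (hnd : asn.keys.Nodup) :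
    (List.any (PySem.Set.ofList periods) (fun period => ((adjD.getD period []).any (fun q =>
        if PySem.Set.contains (PySem.Set.ofList periods) q then false
        else match asn.get? (day, q) with
          | none => false
          | some secs => !secs.isEmpty && !(secs == sig)))))
    = !(PySem.Set.isdisjoint
        (PySem.Set.diff (periods.foldl (fun acc p => PySem.Set.union acc (adjD.getD p [])) PySem.Set.empty)
          (PySem.Set.ofList periods))
        (asn.items.foldl
          (fun acc it => if it.1.1 == day && !it.2.isEmpty && !(it.2 == sig)
            then PySem.Set.add acc it.1.2 else acc) PySem.Set.empty)) := by
  rw [Bool.eq_iff_iff, Bool.not_eq_true', Bool.eq_false_iff]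
  simp only [ne_eq, PySem.Set.isdisjoint_iff, List.any_eq_true, not_forall, Classical.not_not]
  constructor
  case mpr =>
    rintro ⟨q, hq1, hq2⟩
    rw [PySem.Set.mem_diff, pv_mem_union_fold] at hq1
    obtain ⟨hacc | ⟨p, hp, hadj⟩, hnotP⟩ := hq1
    · exact absurd hacc (by simp [PySem.Set.empty])
    · rw [pv_mem_filter_add_fold] at hq2
      rcases hq2 with hacc | ⟨⟨⟨d, q'⟩, secs⟩, hit, hc, rfl⟩
      · exact absurd hacc (by simp [PySem.Set.empty])
      · simp only [Bool.and_eq_true, beq_iff_eq] at hc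
        obtain ⟨⟨hd, hne⟩, hns⟩ := hc
        subst hd
        refine ⟨p, by simpa [PySem.Set.mem_ofList] using hp, q, ?_, ?_⟩
        · exact hadj
        · rw [if_neg (by simpa [PySem.Set.contains_iff] using hnotP)]
          rw [PySem.Dict.get?_of_mem_items asn hit hnd]
          simp [hne, hns]
  case mp =>
    rintro ⟨p, hp, q, hadj, hcond⟩
    split at hcond
    · exact absurd hcond (by simp)
    · rename_i hcP
      split at hcond
      · exact absurd hcond (by simp)
      · rename_i secs hget
        simp only [Bool.and_eq_true, Bool.not_eq_true'] at hcond
        refine ⟨q, ?_, ?_⟩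
        · rw [PySem.Set.mem_diff, pv_mem_union_fold]
          constructor
          · exact Or.inr ⟨p, by simpa [PySem.Set.mem_ofList] using hp, hadj⟩
          · intro hmem
            exact hcP (by simpa [PySem.Set.contains_iff] using hmem)
        · rw [pv_mem_filter_add_fold]
          exact Or.inr ⟨((day, q), secs), PySem.Dict.mem_items_of_get?_eq_some asn hget,
            by simp [hcond.1, hcond.2], rfl⟩

-- ===== VERDICT (by name: the statement is the Claim_ definition above) =====
theorem faculty_has_consecutive_different_section_conflict_py_spec : Claim_equal_faculty_has_consecutive_different_section_conflict_py := by
  intro faculty_id day periods section_signature faculty_section_slots session_adjacency _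
  unfold Spec_faculty_has_consecutive_different_section_conflict_py
  unfold faculty_has_consecutive_different_section_conflict_py
    faculty_has_consecutive_different_section_conflict_py_alt
  exact pv_conflict_eq day section_signature periods _ _ (PySem.Dict.nodup_keys_ofList _)
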